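-- pv_equiv track=rewrite | github.com/RBJBest/Desenvolve-Python-B-sico | Exercícios Modulo 7/7.1 Strings/aula1_questao7.py | alterar_nomes
-- ===== SOURCE A (Python) =====
-- def alterar_nomes(lista_nomes, key):
--     nomes_alterados = []
--     for nome in lista_nomes:
--         nome_alterado = ""
--         for letra in nome:
--             novo_codigo = ord(letra) + (key)
--             nova_letra = chr(novo_codigo)
--             nome_alterado += nova_letra
--         nomes_alterados.append(nome_alterado)
--     return nomes_alterados
-- ===== SOURCE B (Python) =====
-- def alterar_nomes(lista_nomes, key):
--     table = {ord(c): chr(ord(c) + key) for nome in lista_nomes for c in nome}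
--     return [nome.translate(table) for nome in lista_nomes]
-- ===== Notes on version B (the rewrite author's own statement) =====
-- stated objective: idiomatic
-- what changed: B builds one shift table (a dict comprehension over the occurring characters) and maps every name through str.translate, replacing A's per-character ord/chr/string-concatenation inner loop.
import Mathlib
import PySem

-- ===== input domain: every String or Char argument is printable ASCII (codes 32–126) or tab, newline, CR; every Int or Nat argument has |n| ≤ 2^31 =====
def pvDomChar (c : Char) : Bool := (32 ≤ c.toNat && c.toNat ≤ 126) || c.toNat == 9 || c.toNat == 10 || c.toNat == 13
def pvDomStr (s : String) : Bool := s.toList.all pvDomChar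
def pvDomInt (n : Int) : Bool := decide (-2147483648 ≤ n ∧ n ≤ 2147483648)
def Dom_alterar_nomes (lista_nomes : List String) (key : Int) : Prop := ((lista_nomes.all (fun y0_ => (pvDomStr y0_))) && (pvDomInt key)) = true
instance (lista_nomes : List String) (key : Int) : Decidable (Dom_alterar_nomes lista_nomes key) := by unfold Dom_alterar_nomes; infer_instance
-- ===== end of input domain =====

-- B builds one shift table from the distinct characters (a dict comprehension) and translates every
-- name through it, instead of A's per-character ord/chr/concatenate inner loop (objective: idiomatic).

-- chr(n) for a valid non-surrogate code point n (Pre_ guarantees validity; exact there)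
def pyChr (n : Int) : Char := Char.ofNat n.toNat

-- ===== PORT A =====
def alterar_nomes (lista_nomes : List String) (key : Int) : List String :=
  lista_nomes.foldl
    (fun nomes_alterados nome =>
      nomes_alterados ++
        [String.mk (nome.toList.foldl
          (fun nome_alterado letra => nome_alterado ++ [pyChr ((letra.toNat : Int) + key)]) [])])
    []

-- ===== PORT B =====
-- table = {ord(c): chr(ord(c) + key) for nome in lista_nomes for c in nome}
def shiftTable (lista_nomes : List String) (key : Int) : PySem.Dict Int Char :=
  lista_nomes.foldl
    (fun d nome =>
      nome.toList.foldl
        (fun d c => d.insert (c.toNat : Int) (pyChr ((c.toNat : Int) + key))) d)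
    PySem.Dict.empty

-- nome.translate(table): chars without an entry pass through unchanged
def translateStr (table : PySem.Dict Int Char) (nome : String) : String :=
  String.mk (nome.toList.map (fun c => (table.get? (c.toNat : Int)).getD c))

def alterar_nomes_alt (lista_nomes : List String) (key : Int) : List String :=
  (lista_nomes.map (translateStr (shiftTable lista_nomes key)))

-- ===== PRECONDITION & SPEC =====
-- Pre_ excludes shifts that land outside chr's range [0, 0x10FFFF] (there Python A raises ValueError)
-- or inside the surrogate range [0xD800, 0xE000) (there A returns lone-surrogate strings, which
-- Lean's Char/String cannot represent, so no port can state them).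
def Pre_alterar_nomes (lista_nomes : List String) (key : Int) : Prop :=
  (lista_nomes.all (fun nome => nome.toList.all (fun c =>
    decide (0 ≤ (c.toNat : Int) + key) &&
    (decide ((c.toNat : Int) + key < 55296) || decide (57344 ≤ (c.toNat : Int) + key)) &&
    decide ((c.toNat : Int) + key ≤ 1114111)))) = true
instance (lista_nomes : List String) (key : Int) : Decidable (Pre_alterar_nomes lista_nomes key) := by
  unfold Pre_alterar_nomes; infer_instance

def pvWitness_alterar_nomes : List String × Int := (["Ana", "Bob"], 3)

def Spec_alterar_nomes (lista_nomes : List String) (key : Int) (out : List String) : Prop := out = alterar_nomes_alt lista_nomes key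
instance (lista_nomes : List String) (key : Int) (out : List String) : Decidable (Spec_alterar_nomes lista_nomes key out) := by unfold Spec_alterar_nomes; infer_instance

-- ===== CLAIM (what is proved, stated in full; the proofs are below) =====
def Claim_equal_alterar_nomes : Prop := ∀ (lista_nomes : List String) (key : Int), Dom_alterar_nomes lista_nomes key → Pre_alterar_nomes lista_nomes key → Spec_alterar_nomes lista_nomes key (alterar_nomes lista_nomes key)

-- ===== LEMMAS AND PROOFS =====

-- A's snoc-accumulating folds are maps
theorem foldl_snoc {α β : Type} (f : α → β) (l : List α) (acc : List β) :
    l.foldl (fun a x => a ++ [f x]) acc = acc ++ l.map f := by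
  induction l generalizing acc with
  | nil => simp
  | cons a t ih => simp [List.foldl, ih]

-- an entry for c with the shift value survives any further inserts of the inner loop
theorem inner_pres (key : Int) (c : Char) (t : List Char) (d : PySem.Dict Int Char)
    (h : d.get? (c.toNat : Int) = some (pyChr ((c.toNat : Int) + key))) :
    (t.foldl (fun d x => d.insert (x.toNat : Int) (pyChr ((x.toNat : Int) + key))) d).get?
      (c.toNat : Int) = some (pyChr ((c.toNat : Int) + key)) := by
  induction t generalizing d with
  | nil => simpa using h
  | cons a t ih =>
    simp only [List.foldl]
    apply ih
    by_cases hc : (c.toNat : Int) = (a.toNat : Int)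
    · rw [hc, PySem.Dict.get?_insert_self, ← hc]
    · rw [PySem.Dict.get?_insert_of_ne _ _ hc, h]

theorem inner_get (key : Int) (c : Char) (t : List Char) (d : PySem.Dict Int Char) (hc : c ∈ t) :
    (t.foldl (fun d x => d.insert (x.toNat : Int) (pyChr ((x.toNat : Int) + key))) d).get?
      (c.toNat : Int) = some (pyChr ((c.toNat : Int) + key)) := by
  induction t generalizing d with
  | nil => cases hc
  | cons a t ih =>
    simp only [List.foldl]
    by_cases ht : c ∈ t
    · exact ih _ ht
    · have hca : c = a := by
        rcases List.mem_cons.mp hc with h | h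
        · exact h
        · exact absurd h ht
      subst hca
      exact inner_pres key c t _ (PySem.Dict.get?_insert_self _ _ _)

theorem outer_pres (key : Int) (c : Char) (ls : List String) (d : PySem.Dict Int Char)
    (h : d.get? (c.toNat : Int) = some (pyChr ((c.toNat : Int) + key))) :
    (ls.foldl (fun d nome => nome.toList.foldl
        (fun d x => d.insert (x.toNat : Int) (pyChr ((x.toNat : Int) + key))) d) d).get?
      (c.toNat : Int) = some (pyChr ((c.toNat : Int) + key)) := by
  induction ls generalizing d with
  | nil => simpa using h
  | cons s t ih =>
    simp only [List.foldl]
    exact ih _ (inner_pres key c s.toList d h)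

theorem table_get (lista_nomes : List String) (key : Int) (nome : String) (c : Char)
    (hn : nome ∈ lista_nomes) (hc : c ∈ nome.toList) :
    (shiftTable lista_nomes key).get? (c.toNat : Int) = some (pyChr ((c.toNat : Int) + key)) := by
  unfold shiftTable
  generalize PySem.Dict.empty = d
  induction lista_nomes generalizing d with
  | nil => cases hn
  | cons s t ih =>
    simp only [List.foldl]
    rcases List.mem_cons.mp hn with h | h
    · subst h
      exact outer_pres key c t _ (inner_get key c nome.toList d hc)
    · exact ih h _

theorem translate_eq (lista_nomes : List String) (key : Int) (nome : String)
    (hn : nome ∈ lista_nomes) :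
    translateStr (shiftTable lista_nomes key) nome =
      String.mk (nome.toList.map (fun c => pyChr ((c.toNat : Int) + key))) := by
  unfold translateStr
  congr 1
  apply List.map_congr_left
  intro c hc
  rw [table_get lista_nomes key nome c hn hc]
  rfl

-- ===== VERDICT (by name: the statement is the Claim_ definition above) =====
theorem alterar_nomes_spec : Claim_equal_alterar_nomes := by
  intro lista_nomes key _ _
  unfold Spec_alterar_nomes alterar_nomes alterar_nomes_alt
  rw [foldl_snoc]
  simp only [List.nil_append]
  apply List.map_congr_left
  intro nome hn
  rw [foldl_snoc, List.nil_append, translate_eq lista_nomes key nome hn]
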